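-- pv_equiv track=rewrite | github.com/onesandzeroes/Neighbours | Neighbours2.py | min_overlap_one_word
-- ===== SOURCE A (Python) =====
-- import collections
--
-- def min_overlap_one_word(word, match_options, most_important="same_position"):
--     """
--     Find the item from match_options that has the smallest
--     overlap with word, in terms of total shared letters and
--     the number of letters in the same position.
--     The most_important argument is used to specify whether:
--         "same_position": The number of letters in the same postion, or
--         "total": The total number of shared letters
--     is the most important value to minimize.
--     """
--     # Use the ranking method that's not most_important to break ties
--     other_method = {"same_position": "total", "total": "same_position"}
--     next_important = other_method[most_important]
--     match_stats = {}
--     for match in match_options: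
--         match_stats[match] = {
--             'total': overlap(word, match, "total"),
--             'same_position': overlap(word, match, "same_position")
--         }
--     # Find the best value on the most_important variable
--     best_first_ranking = min(
--         match_stats[m][most_important] for m in match_stats)
--     # Find all the match options that take that value
--     all_good_options = []
--     for match in match_options:
--         if match_stats[match][most_important] == best_first_ranking:
--             all_good_options.append(match)
--     # Break ties using the next most important overlap measure
--     # Not quite sure how to deal with the fact that multiple items
--     # might be tied for the best ranking: currently this will just return
--     # whichever happens to come first
--     best_match = min(
--         all_good_options,
--         key=lambda x: match_stats[x][next_important]
--     )
--     return best_match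
--
-- def overlap(w1, w2, method='same_position'):
--     """
--     Convenience function to make it easy to call either overlap_total
--     or overlap_same_position by passing either "same_position" or
--     "total" as the method.
--     The individual functions can still be used directly, this
--     just makes it easier to call them in code that might use one or the
--     other at different times
--     """
--     if method == 'same_position':
--         return overlap_same_position(w1, w2)
--     elif method == 'total':
--         return overlap_total(w1, w2)
--
-- def overlap_total(w1, w2):
--     """
--     Find the total number of shared letters in w1 and w2.
--     Returns an int
--     """
--     total = 0
--     w1_counts = collections.Counter(w1)
--     w2_counts = collections.Counter(w2)
--     # If a letter appears more than once in either word,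
--     # then the number of shared letters it should count
--     # for is the minimum of w1_counts[letter] and w2_counts[letter]
--     for letter in w1_counts:
--         if letter in w2_counts:
--             total += min(w1_counts[letter], w2_counts[letter])
--     return total
--
-- def overlap_same_position(w1, w2):
--     """
--     Find the total number of letters which overlap in w1 and w2,
--     i.e. the same letters in the same position.
--     Returns an int.
--     """
--     total = 0
--     zipped_words = zip(w1, w2)
--     for l1, l2 in zipped_words:
--         if l1 == l2:
--             total += 1
--     return total
-- ===== SOURCE B (Python) =====
-- import collections
--
-- def min_overlap_one_word(word, match_options, most_important="same_position"):
--     """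
--     Find the item from match_options with the smallest overlap with word,
--     minimizing most_important first and breaking ties with the other measure.
--     Single pass: min with a composite (primary, secondary) key.
--     """
--     other_method = {"same_position": "total", "total": "same_position"}
--     next_important = other_method[most_important]
--     return min(
--         match_options,
--         key=lambda m: (overlap(word, m, most_important),
--                        overlap(word, m, next_important))
--     )
--
-- def overlap(w1, w2, method='same_position'):
--     if method == 'same_position':
--         return overlap_same_position(w1, w2)
--     elif method == 'total':
--         return overlap_total(w1, w2)
--
-- def overlap_total(w1, w2):
--     total = 0
--     w1_counts = collections.Counter(w1)
--     w2_counts = collections.Counter(w2)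
--     for letter in w1_counts:
--         if letter in w2_counts:
--             total += min(w1_counts[letter], w2_counts[letter])
--     return total
--
-- def overlap_same_position(w1, w2):
--     total = 0
--     for l1, l2 in zip(w1, w2):
--         if l1 == l2:
--             total += 1
--     return total
-- ===== Notes on version B (the rewrite author's own statement) =====
-- stated objective: simpler
-- what changed: Replaces the dict-of-stats build, separate min over the primary metric, filter of tied options and second min over the secondary metric with one single min over match_options using a composite (primary, secondary) tuple key; the overlap helpers are unchanged.
import Mathlib
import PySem

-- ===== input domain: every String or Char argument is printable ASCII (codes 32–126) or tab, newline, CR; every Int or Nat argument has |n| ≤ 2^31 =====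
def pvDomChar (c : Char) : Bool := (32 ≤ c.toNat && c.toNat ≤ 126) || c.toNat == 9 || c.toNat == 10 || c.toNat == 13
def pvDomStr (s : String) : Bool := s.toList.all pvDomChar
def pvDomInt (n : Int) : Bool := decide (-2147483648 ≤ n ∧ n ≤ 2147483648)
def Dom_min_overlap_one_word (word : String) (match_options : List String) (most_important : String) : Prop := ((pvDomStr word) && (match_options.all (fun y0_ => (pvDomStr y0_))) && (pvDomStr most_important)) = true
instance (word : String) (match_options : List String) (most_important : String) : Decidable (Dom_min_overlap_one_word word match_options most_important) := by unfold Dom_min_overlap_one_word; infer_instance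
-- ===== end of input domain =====

-- ===== PORT A =====
-- B replaces A's four-stage staging (stats dict, min of the primary metric, filter of
-- ties, min of the secondary metric) with one single pass: min under a composite
-- (primary, secondary) key; the overlap helpers are unchanged.  Objective: simpler.

-- shared helpers (identical in Source A and Source B): overlap_total / overlap_same_position / overlap
def overlap_total (w1 w2 : String) : Int :=
  let w1_counts := PySem.Dict.counter w1.toList
  let w2_counts := PySem.Dict.counter w2.toList
  w1_counts.keys.foldl
    (fun total letter =>
      if w2_counts.contains letter then
        total + min (w1_counts.getD letter 0) (w2_counts.getD letter 0)
      else total) 0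

def overlap_same_position (w1 w2 : String) : Int :=
  (w1.toList.zip w2.toList).foldl (fun total p => if p.1 = p.2 then total + 1 else total) 0

-- Python's overlap returns None on any other method; both callers only pass the two
-- literal method names, so the final branch is never reached.
def overlap (w1 w2 : String) (method : String) : Int :=
  if method = "same_position" then overlap_same_position w1 w2
  else if method = "total" then overlap_total w1 w2
  else 0

def min_overlap_one_word (word : String) (match_options : List String) (most_important : String) : String :=
  let other_method : PySem.Dict String String :=
    PySem.Dict.ofList [("same_position", "total"), ("total", "same_position")]
  match other_method.get? most_important with
  | none => ""   -- Python: KeyError (excluded by Pre_)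
  | some next_important =>
    let match_stats : PySem.Dict String (PySem.Dict String Int) :=
      match_options.foldl
        (fun d m => d.insert m (PySem.Dict.ofList
          [("total", overlap word m "total"),
           ("same_position", overlap word m "same_position")]))
        PySem.Dict.empty
    match PySem.List.min?
        (match_stats.keys.map (fun m => (match_stats.getD m PySem.Dict.empty).getD most_important 0))
        (fun v => v) with
    | none => ""   -- Python: ValueError, min() of empty sequence (excluded by Pre_)
    | some best_first_ranking =>
      let all_good_options := match_options.filter
        (fun m => (match_stats.getD m PySem.Dict.empty).getD most_important 0 == best_first_ranking)
      match PySem.List.min? all_good_options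
          (fun x => (match_stats.getD x PySem.Dict.empty).getD next_important 0) with
      | none => ""   -- unreachable: all_good_options is nonempty when match_options is
      | some best_match => best_match

-- ===== PORT B =====
def min_overlap_one_word_alt (word : String) (match_options : List String) (most_important : String) : String :=
  let other_method : PySem.Dict String String :=
    PySem.Dict.ofList [("same_position", "total"), ("total", "same_position")]
  match other_method.get? most_important with
  | none => ""   -- Python: KeyError (excluded by Pre_)
  | some next_important =>
    match PySem.List.min2? match_options
        (fun m => overlap word m most_important)
        (fun m => overlap word m next_important) with
    | none => ""   -- Python: ValueError, min() of empty sequence (excluded by Pre_)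
    | some best => best

-- ===== PRECONDITION & SPEC =====
-- Pre_ excludes exactly the inputs where the Python A raises: an empty match_options
-- (ValueError from min) and a most_important other than the two method names (KeyError).
def Pre_min_overlap_one_word (word : String) (match_options : List String) (most_important : String) : Prop :=
  match_options ≠ [] ∧ (most_important = "same_position" ∨ most_important = "total")
instance (word : String) (match_options : List String) (most_important : String) : Decidable (Pre_min_overlap_one_word word match_options most_important) := by unfold Pre_min_overlap_one_word; infer_instance

def pvWitness_min_overlap_one_word : String × List String × String := ("cat", ["dog", "act"], "same_position")

def Spec_min_overlap_one_word (word : String) (match_options : List String) (most_important : String) (out : String) : Prop := out = min_overlap_one_word_alt word match_options most_important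
instance (word : String) (match_options : List String) (most_important : String) (out : String) : Decidable (Spec_min_overlap_one_word word match_options most_important out) := by unfold Spec_min_overlap_one_word; infer_instance

-- ===== CLAIM (what is proved, stated in full; the proofs are below) =====
def Claim_equal_min_overlap_one_word : Prop := ∀ (word : String) (match_options : List String) (most_important : String), Dom_min_overlap_one_word word match_options most_important → Pre_min_overlap_one_word word match_options most_important → Spec_min_overlap_one_word word match_options most_important (min_overlap_one_word word match_options most_important)

-- ===== LEMMAS AND PROOFS =====

-- the fold step of PySem.List.min2? (Python's min with a tuple key)
def pvStep2 (f g : String → Int) (acc : Option String) (x : String) : Option String :=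
  match acc with
  | none => some x
  | some m => if (decide (f x < f m) || (!decide (f m < f x) && decide (g x < g m))) then some x else some m

-- the fold step of PySem.List.min? (Python's min with a plain key)
def pvStep1 (g : String → Int) (acc : Option String) (x : String) : Option String :=
  match acc with
  | none => some x
  | some m => if g x < g m then some x else some m

lemma min2?_eq_foldl (xs : List String) (f g : String → Int) :
    PySem.List.min2? xs f g = xs.foldl (pvStep2 f g) none := by
  unfold PySem.List.min2?
  congr 1
  funext acc x
  cases acc with
  | none => rfl
  | some m => simp [pvStep2]

lemma min?_eq_foldl (xs : List String) (g : String → Int) :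
    PySem.List.min? xs g = xs.foldl (pvStep1 g) none := by
  unfold PySem.List.min?
  congr 1
  funext acc x
  cases acc with
  | none => rfl
  | some m => simp [pvStep1]

-- a min? fold only reads the key on the elements it sees
lemma foldl_step1_congr (g g' : String → Int) :
    ∀ (xs : List String) (acc : Option String), (∀ x ∈ xs, g x = g' x) →
    (∀ m, acc = some m → g m = g' m) →
    xs.foldl (pvStep1 g) acc = xs.foldl (pvStep1 g') acc := by
  intro xs
  induction xs with
  | nil => intro acc _ _; rfl
  | cons x t ih =>
    intro acc hx hacc
    have hx' : g x = g' x := hx x (by simp)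
    have hstep : pvStep1 g acc x = pvStep1 g' acc x := by
      cases acc with
      | none => rfl
      | some m => simp [pvStep1, hx', hacc m rfl]
    simp only [List.foldl_cons, hstep]
    refine ih _ (fun y hy => hx y (by simp [hy])) ?_
    intro m hm
    cases acc with
    | none =>
      simp only [pvStep1] at hm
      cases hm; exact hx'
    | some m0 =>
      simp only [pvStep1] at hm
      split at hm <;> cases hm
      · exact hx'
      · exact hacc _ rfl

-- on a list where f is constant, the lexicographic fold is the plain g-fold
lemma foldl_step2_const (f g : String → Int) (c : Int) :
    ∀ (xs : List String) (acc : Option String), (∀ x ∈ xs, f x = c) →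
    (acc = none ∨ ∃ m, acc = some m ∧ f m = c) →
    xs.foldl (pvStep2 f g) acc = xs.foldl (pvStep1 g) acc := by
  intro xs
  induction xs with
  | nil => intro acc _ _; rfl
  | cons x t ih =>
    intro acc hx hacc
    have hxc : f x = c := hx x (by simp)
    have hstep : pvStep2 f g acc x = pvStep1 g acc x := by
      rcases hacc with h | ⟨m, hm, hfm⟩
      · subst h; rfl
      · subst hm; simp [pvStep2, pvStep1, hxc, hfm]
    rw [List.foldl_cons, List.foldl_cons, hstep]
    refine ih _ (fun y hy => hx y (by simp [hy])) ?_
    right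
    rcases hacc with h | ⟨m, hm, hfm⟩
    · subst h; exact ⟨x, rfl, hxc⟩
    · subst hm
      simp only [pvStep1]
      split
      · exact ⟨x, rfl, hxc⟩
      · exact ⟨m, rfl, hfm⟩

-- dropping the elements whose f-value is not the minimum does not change the lex fold
lemma foldl_step2_filter (f g : String → Int) (bf : Int) :
    ∀ (xs : List String) (accL accR : Option String), (∀ x ∈ xs, bf ≤ f x) →
    ((∃ m, accL = some m ∧ accR = accL ∧ f m = bf) ∨
      (accR = none ∧ (∃ x ∈ xs, f x = bf) ∧ ∀ m, accL = some m → bf < f m)) →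
    xs.foldl (pvStep2 f g) accL = (xs.filter (fun x => f x == bf)).foldl (pvStep2 f g) accR := by
  intro xs
  induction xs with
  | nil =>
    intro accL accR _ hacc
    rcases hacc with ⟨m, hL, hR, _⟩ | ⟨_, ⟨x, hx, _⟩, _⟩
    · rw [hL, hR, hL]; rfl
    · cases hx
  | cons x t ih =>
    intro accL accR hlb hacc
    have hlbx : bf ≤ f x := hlb x (by simp)
    have hlbt : ∀ y ∈ t, bf ≤ f y := fun y hy => hlb y (by simp [hy])
    by_cases hfx : f x = bf
    · have hkeep : (x :: t).filter (fun y => f y == bf) = x :: t.filter (fun y => f y == bf) := by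
        simp [hfx]
      rw [hkeep, List.foldl_cons, List.foldl_cons]
      rcases hacc with ⟨m, hL, hR, hfm⟩ | ⟨hR, _, hgt⟩
      · subst hL
        rw [hR]
        have hnew : ∃ m', pvStep2 f g (some m) x = some m' ∧ f m' = bf := by
          simp only [pvStep2]
          split
          · exact ⟨x, rfl, hfx⟩
          · exact ⟨m, rfl, hfm⟩
        rcases hnew with ⟨m', hm', hfm'⟩
        exact ih _ _ hlbt (Or.inl ⟨m', hm', rfl, hfm'⟩)
      · subst hR
        have hnewL : pvStep2 f g accL x = some x := by
          cases accL with
          | none => rfl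
          | some m =>
            have hxm : f x < f m := by rw [hfx]; exact hgt m rfl
            simp [pvStep2, hxm]
        rw [hnewL]
        exact ih _ _ hlbt (Or.inl ⟨x, rfl, rfl, hfx⟩)
    · have hlt : bf < f x := lt_of_le_of_ne hlbx (fun h => hfx h.symm)
      have hdrop : (x :: t).filter (fun y => f y == bf) = t.filter (fun y => f y == bf) := by
        simp [hfx]
      rw [hdrop, List.foldl_cons]
      rcases hacc with ⟨m, hL, hR, hfm⟩ | ⟨hR, ⟨x0, hx0, hfx0⟩, hgt⟩
      · subst hL
        have h1 : ¬ f x < f m := by rw [hfm]; exact not_lt.2 hlt.le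
        have h2 : f m < f x := by rw [hfm]; exact hlt
        have hkeepm : pvStep2 f g (some m) x = some m := by
          simp [pvStep2, h1, h2]
        rw [hkeepm]
        exact ih _ _ hlbt (Or.inl ⟨m, rfl, hR, hfm⟩)
      · subst hR
        have hx0t : x0 ∈ t := by
          rcases List.mem_cons.1 hx0 with h | h
          · exact absurd (h ▸ hfx0) hfx
          · exact h
        have hnew : ∀ m, pvStep2 f g accL x = some m → bf < f m := by
          intro m hm
          cases accL with
          | none =>
            simp only [pvStep2] at hm
            cases hm; exact hlt
          | some m0 =>
            simp only [pvStep2] at hm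
            split at hm <;> cases hm
            · exact hlt
            · exact hgt _ rfl
        exact ih _ _ hlbt (Or.inr ⟨rfl, ⟨x0, hx0t, hfx0⟩, hnew⟩)

-- the heart: Python's min with tuple key (f,g) = min over f, filter the ties, min over g
lemma first_lex_min (f g : String → Int) (xs : List String) (bf : Int)
    (hlb : ∀ x ∈ xs, bf ≤ f x) (hat : ∃ x ∈ xs, f x = bf) :
    PySem.List.min2? xs f g = PySem.List.min? (xs.filter (fun x => f x == bf)) g := by
  rw [min2?_eq_foldl, min?_eq_foldl]
  rw [foldl_step2_filter f g bf xs none none hlb (Or.inr ⟨rfl, hat, fun m hm => by cases hm⟩)]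
  exact foldl_step2_const f g bf _ none
    (fun x hx => by simpa using (List.mem_filter.1 hx).2) (Or.inl rfl)

-- min with the identity key is determined by membership alone
lemma min?_id_eq_of_mem_iff (l1 l2 : List Int) (h : ∀ v, v ∈ l1 ↔ v ∈ l2) :
    PySem.List.min? l1 (fun v => v) = PySem.List.min? l2 (fun v => v) := by
  cases h1 : PySem.List.min? l1 (fun v => v) with
  | none =>
    rw [PySem.List.min?_eq_none_iff] at h1
    subst h1
    have h2 : l2 = [] := by
      cases l2 with
      | nil => rfl
      | cons y t => exact absurd ((h y).2 (by simp)) (by simp)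
    rw [h2]; rfl
  | some m1 =>
    cases h2 : PySem.List.min? l2 (fun v => v) with
    | none =>
      rw [PySem.List.min?_eq_none_iff] at h2
      subst h2
      exact absurd ((h m1).1 (PySem.List.min?_mem h1)) (by simp)
    | some m2 =>
      have hm1 : m1 ∈ l2 := (h m1).1 (PySem.List.min?_mem h1)
      have hm2 : m2 ∈ l1 := (h m2).2 (PySem.List.min?_mem h2)
      have hle1 : m1 ≤ m2 := PySem.List.min?_isMin h1 m2 hm2
      have hle2 : m2 ≤ m1 := PySem.List.min?_isMin h2 m1 hm1
      rw [le_antisymm hle1 hle2]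

-- a fold of inserts at other keys leaves a lookup unchanged
lemma getD_foldl_insert_not_mem {ν : Type} (F : String → ν) (dflt : ν) :
    ∀ (xs : List String) (d : PySem.Dict String ν) (m : String), m ∉ xs →
    (xs.foldl (fun d x => d.insert x (F x)) d).getD m dflt = d.getD m dflt := by
  intro xs
  induction xs with
  | nil => intro d m _; rfl
  | cons x t ih =>
    intro d m hm
    rw [List.foldl_cons, ih _ m (fun h => hm (by simp [h])),
      PySem.Dict.getD_insert_of_ne _ (F x) dflt (fun h => hm (by simp [h]))]

-- the stats dict built by A looks up to the recomputed value
lemma getD_foldl_insert_mem {ν : Type} (F : String → ν) (dflt : ν) :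
    ∀ (xs : List String) (d : PySem.Dict String ν) (m : String), m ∈ xs →
    (xs.foldl (fun d x => d.insert x (F x)) d).getD m dflt = F m := by
  intro xs
  induction xs with
  | nil => intro d m hm; cases hm
  | cons x t ih =>
    intro d m hm
    rw [List.foldl_cons]
    by_cases hmt : m ∈ t
    · exact ih _ m hmt
    · have hmx : m = x := by
        rcases List.mem_cons.1 hm with h | h
        · exact h
        · exact absurd h hmt
      subst hmx
      rw [getD_foldl_insert_not_mem F dflt t _ m hmt, PySem.Dict.getD_insert_self]

lemma mem_keys_foldl_insert {ν : Type} (F : String → ν) (xs : List String) (m : String) :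
    m ∈ (xs.foldl (fun d x => d.insert x (F x)) PySem.Dict.empty).keys ↔ m ∈ xs := by
  rw [PySem.Dict.keys_foldl_insert xs (fun _ x => F x) PySem.Dict.empty]
  simp [PySem.Set.mem_update, PySem.Dict.keys_empty]

-- A's staged computation equals B's one-pass min, for abstract metrics f and g
-- looked up through the stats dict built from F
lemma core2 (f g : String → Int) (F : String → PySem.Dict String Int) (mi ni : String)
    (xs : List String) (hne : xs ≠ [])
    (hFmi : ∀ m, (F m).getD mi 0 = f m) (hFni : ∀ m, (F m).getD ni 0 = g m) :
    (match PySem.List.min?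
        ((xs.foldl (fun d m => d.insert m (F m)) PySem.Dict.empty).keys.map
          (fun m => ((xs.foldl (fun d m => d.insert m (F m)) PySem.Dict.empty).getD m PySem.Dict.empty).getD mi 0))
        (fun v => v) with
     | none => ""
     | some best_first_ranking =>
       match PySem.List.min?
           (xs.filter (fun m => ((xs.foldl (fun d m => d.insert m (F m)) PySem.Dict.empty).getD m PySem.Dict.empty).getD mi 0 == best_first_ranking))
           (fun x => ((xs.foldl (fun d m => d.insert m (F m)) PySem.Dict.empty).getD x PySem.Dict.empty).getD ni 0) with
       | none => ""
       | some best_match => best_match) =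
    (match PySem.List.min2? xs f g with
     | none => ""
     | some best => best) := by
  have hkey : ∀ m ∈ xs, (xs.foldl (fun d m => d.insert m (F m)) PySem.Dict.empty).getD m PySem.Dict.empty = F m :=
    fun m hm => getD_foldl_insert_mem F PySem.Dict.empty xs PySem.Dict.empty m hm
  have hmemk := mem_keys_foldl_insert F xs
  have hmap : (xs.foldl (fun d m => d.insert m (F m)) PySem.Dict.empty).keys.map
      (fun m => ((xs.foldl (fun d m => d.insert m (F m)) PySem.Dict.empty).getD m PySem.Dict.empty).getD mi 0) =
      (xs.foldl (fun d m => d.insert m (F m)) PySem.Dict.empty).keys.map f :=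
    List.map_congr_left (fun m hm => by rw [hkey m ((hmemk m).1 hm), hFmi])
  have hminmap : PySem.List.min? ((xs.foldl (fun d m => d.insert m (F m)) PySem.Dict.empty).keys.map f) (fun v => v) =
      PySem.List.min? (xs.map f) (fun v => v) := by
    refine min?_id_eq_of_mem_iff _ _ (fun v => ?_)
    simp only [List.mem_map]
    exact ⟨fun ⟨m, hm, hv⟩ => ⟨m, (hmemk m).1 hm, hv⟩, fun ⟨m, hm, hv⟩ => ⟨m, (hmemk m).2 hm, hv⟩⟩
  rw [hmap, hminmap]
  cases hbf : PySem.List.min? (xs.map f) (fun v => v) with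
  | none =>
    rw [PySem.List.min?_eq_none_iff, List.map_eq_nil_iff] at hbf
    exact absurd hbf hne
  | some bf =>
    have hlb : ∀ x ∈ xs, bf ≤ f x := fun x hx =>
      PySem.List.min?_isMin hbf (f x) (List.mem_map.2 ⟨x, hx, rfl⟩)
    have hat : ∃ x ∈ xs, f x = bf := by
      rcases List.mem_map.1 (PySem.List.min?_mem hbf) with ⟨x, hx, hv⟩
      exact ⟨x, hx, hv⟩
    have hfilter : xs.filter (fun m => ((xs.foldl (fun d m => d.insert m (F m)) PySem.Dict.empty).getD m PySem.Dict.empty).getD mi 0 == bf) =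
        xs.filter (fun x => f x == bf) :=
      List.filter_congr (fun m hm => by rw [hkey m hm, hFmi])
    have hkeyfun : PySem.List.min? (xs.filter (fun x => f x == bf))
        (fun x => ((xs.foldl (fun d m => d.insert m (F m)) PySem.Dict.empty).getD x PySem.Dict.empty).getD ni 0) =
        PySem.List.min? (xs.filter (fun x => f x == bf)) g := by
      rw [min?_eq_foldl, min?_eq_foldl]
      refine foldl_step1_congr _ _ _ none ?_ (fun m hm => by cases hm)
      intro x hx
      rw [hkey x (List.mem_filter.1 hx).1, hFni]
    dsimp only
    rw [hfilter, hkeyfun, ← first_lex_min f g xs bf hlb hat]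

-- A = B once the two method names are fixed: used for both cases of Pre_
lemma core (word : String) (xs : List String) (hne : xs ≠ []) (mi ni : String)
    (hm : mi = "same_position" ∧ ni = "total" ∨ mi = "total" ∧ ni = "same_position") :
    min_overlap_one_word word xs mi = min_overlap_one_word_alt word xs mi := by
  rcases hm with ⟨h1, h2⟩ | ⟨h1, h2⟩ <;> subst h1 <;> subst h2
  · exact core2 (fun m => overlap word m "same_position") (fun m => overlap word m "total")
      (fun m => PySem.Dict.ofList
        [("total", overlap word m "total"), ("same_position", overlap word m "same_position")])
      "same_position" "total" xs hne (fun m => rfl) (fun m => rfl)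
  · exact core2 (fun m => overlap word m "total") (fun m => overlap word m "same_position")
      (fun m => PySem.Dict.ofList
        [("total", overlap word m "total"), ("same_position", overlap word m "same_position")])
      "total" "same_position" xs hne (fun m => rfl) (fun m => rfl)

-- ===== VERDICT (by name: the statement is the Claim_ definition above) =====
theorem min_overlap_one_word_spec : Claim_equal_min_overlap_one_word := by
  intro word xs mi _ hpre
  unfold Spec_min_overlap_one_word
  rcases hpre with ⟨hne, hmi⟩
  rcases hmi with h | h
  · exact core word xs hne mi "total" (Or.inl ⟨h, rfl⟩)
  · exact core word xs hne mi "same_position" (Or.inr ⟨h, rfl⟩)
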